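-- pv_equiv track=rewrite | github.com/geokodzilla/kodz | kodz/analizy.py | _ignore_kon
-- ===== SOURCE A (Python) =====
-- def _ignore_kon(data, ignorowane):
-- 	"""
-- 	W anzlizie sytkow umożliwia ignorowanie pewnych konturów określonych
-- 	przez użytkownika, najcześciej dotyczy to uzytków dr.
-- 	:param data:
-- 	:param ignorowane:
-- 	:return:
-- 	"""
-- 	remove = set([])
-- 	for nr, row in enumerate(data):
-- 		for i in ignorowane:
-- 			for ozn in row:
-- 				if i in ozn:
-- 					remove.add(nr)
-- 	remove = list(remove)
-- 	remove.sort() # sortowanie ignorowanych indeksów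
-- 	for i in list(remove)[::-1]:
-- 		data.pop(i)
-- 	return data
-- ===== SOURCE B (Python) =====
-- def _ignore_kon(data, ignorowane):
-- 	"""Keep only rows in which no ignored pattern occurs as a substring of any cell."""
-- 	kept = [row for row in data
-- 	        if not any(i in ozn for i in ignorowane for ozn in row)]
-- 	data[:] = kept  # in-place, preserving the list object's identity like A's pops
-- 	return data
-- ===== Notes on version B (the rewrite author's own statement) =====
-- stated objective: simpler
-- what changed: Instead of collecting matching row indices into a set, sorting them and popping them back-to-front (each pop shifting the tail), B filters the rows directly (keep rows with no matching cell) and reassigns in place with data[:] = kept.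
import Mathlib
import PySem

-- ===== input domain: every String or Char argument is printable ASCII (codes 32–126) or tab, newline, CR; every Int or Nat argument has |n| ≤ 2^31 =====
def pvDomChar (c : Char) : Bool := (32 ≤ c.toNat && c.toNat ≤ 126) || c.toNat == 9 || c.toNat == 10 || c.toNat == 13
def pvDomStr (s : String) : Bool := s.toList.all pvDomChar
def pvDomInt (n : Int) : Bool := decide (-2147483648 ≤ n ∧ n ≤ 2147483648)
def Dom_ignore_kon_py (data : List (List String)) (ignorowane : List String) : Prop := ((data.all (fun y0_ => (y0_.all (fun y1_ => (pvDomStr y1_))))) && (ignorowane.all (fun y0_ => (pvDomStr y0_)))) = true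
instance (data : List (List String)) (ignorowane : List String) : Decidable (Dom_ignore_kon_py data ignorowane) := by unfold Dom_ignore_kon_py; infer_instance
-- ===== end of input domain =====

-- B replaces A's index-set + sort + reverse-pop machinery by a direct filter of the rows
-- (objective: simpler). Both A and B mutate `data` in place to the same final contents
-- (A by pops, B by slice assignment); the theorems are about the returned value.

-- ===== PORT A =====
def ignore_kon_py (data : List (List String)) (ignorowane : List String) : List (List String) :=
  -- remove = set([]); for nr, row in enumerate(data): for i in ignorowane: for ozn in row: if i in ozn: remove.add(nr)
  let remove : PySem.Set Int :=
    (PySem.List.enumerate data 0).foldl (fun s p =>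
      ignorowane.foldl (fun s i =>
        p.2.foldl (fun s ozn => if PySem.Str.isIn i ozn then PySem.Set.add s p.1 else s) s) s)
      PySem.Set.empty
  -- remove = list(remove); remove.sort()
  let removeL := PySem.List.sorted remove (fun x => x) false
  -- for i in list(remove)[::-1]: data.pop(i)   (a step -1 slice never raises, so getD's default is unreachable)
  ((PySem.List.slice? removeL none none (-1)).getD []).foldl
    (fun d i => match PySem.List.pop? d i with
      | some r => r.2
      | none => d)   -- none unreachable: every collected index is a valid index of the current list
    data

-- ===== PORT B =====
def ignore_kon_py_alt (data : List (List String)) (ignorowane : List String) : List (List String) :=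
  -- kept = [row for row in data if not any(i in ozn for i in ignorowane for ozn in row)]; data[:] = kept; return data
  data.filter (fun row => !(ignorowane.any (fun i => row.any (fun ozn => PySem.Str.isIn i ozn))))

-- ===== PRECONDITION & SPEC =====
def Spec_ignore_kon_py (data : List (List String)) (ignorowane : List String) (out : List (List String)) : Prop := out = ignore_kon_py_alt data ignorowane
instance (data : List (List String)) (ignorowane : List String) (out : List (List String)) : Decidable (Spec_ignore_kon_py data ignorowane out) := by unfold Spec_ignore_kon_py; infer_instance

-- ===== CLAIM (what is proved, stated in full; the proofs are below) =====
def Claim_equal_ignore_kon_py : Prop := ∀ (data : List (List String)) (ignorowane : List String), Dom_ignore_kon_py data ignorowane → Spec_ignore_kon_py data ignorowane (ignore_kon_py data ignorowane)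

-- ===== LEMMAS AND PROOFS =====

def pvBad (ignorowane : List String) (row : List String) : Bool :=
  ignorowane.any (fun i => row.any (fun ozn => PySem.Str.isIn i ozn))
def pvRem (ignorowane : List String) : List (List String) → List Nat
  | [] => []
  | r :: t => (if pvBad ignorowane r then [0] else []) ++ (pvRem ignorowane t).map (· + 1)

theorem pvFoldl_add_if {α β : Type} [BEq β] [LawfulBEq β] (xs : List α) (p : α → Bool)
    (s : PySem.Set β) (v : β) :
    xs.foldl (fun s x => if p x then PySem.Set.add s v else s) s
      = if xs.any p then PySem.Set.add s v else s := by
  induction xs generalizing s with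
  | nil => simp
  | cons x t ih =>
    simp only [List.foldl_cons, List.any_cons]
    by_cases h : p x = true
    · simp only [h, if_pos, Bool.true_or, ih]
      split
      · unfold PySem.Set.add
        split <;> simp_all
      · rfl
    · simp [h, ih]

theorem pvCollect (ignorowane : List String) (xs : List (List String)) :
    ∀ (n : Int) (s : List Int), (∀ x ∈ s, x < n) →
    (PySem.List.enumerate xs n).foldl (fun s p =>
      ignorowane.foldl (fun s i =>
        p.2.foldl (fun s ozn => if PySem.Str.isIn i ozn then PySem.Set.add s p.1 else s) s) s) s
      = s ++ (pvRem ignorowane xs).map (fun k : Nat => (k : Int) + n) := by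
  induction xs with
  | nil => intro n s _; simp [PySem.List.enumerate_nil, pvRem]
  | cons r t ih =>
    intro n s hs
    rw [PySem.List.enumerate_cons, List.foldl_cons]
    have hstep : ignorowane.foldl (fun s i =>
        r.foldl (fun s ozn => if PySem.Str.isIn i ozn then PySem.Set.add s n else s) s) s
        = if pvBad ignorowane r then PySem.Set.add s n else s := by
      simp only [pvFoldl_add_if, pvBad]
      rfl
    have hadd : (if pvBad ignorowane r then PySem.Set.add s n else s)
        = s ++ (if pvBad ignorowane r then [n] else []) := by
      split
      · have hnc : s.contains n = false := by
          simp only [List.contains_eq_mem, decide_eq_false_iff_not]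
          intro hmem
          exact absurd (hs n hmem) (lt_irrefl n)
        unfold PySem.Set.add PySem.Set.contains
        rw [hnc]
        rfl
      · simp
    rw [hstep, hadd, ih (n + 1) _ (by
      intro x hx
      rcases List.mem_append.1 hx with h | h
      · exact lt_trans (hs x h) (by omega)
      · split at h <;> simp_all)]
    have hmap : List.map (fun k : Nat => (k:Int) + n) ((if pvBad ignorowane r then [0] else []) ++ (pvRem ignorowane t).map (· + 1))
        = (if pvBad ignorowane r then [n] else []) ++ (pvRem ignorowane t).map (fun k : Nat => (k:Int) + (n+1)) := by
      rw [List.map_append, List.map_map]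
      congr 1
      · split <;> simp
      · exact List.map_congr_left (fun k _ => by simp [Function.comp]; ring)
    simp only [pvRem]
    rw [hmap, List.append_assoc]

theorem pvRem_pairwise (ignorowane : List String) (xs : List (List String)) :
    (pvRem ignorowane xs).Pairwise (· < ·) := by
  induction xs with
  | nil => simp [pvRem]
  | cons r t ih =>
    simp only [pvRem]
    rw [List.pairwise_append]
    refine ⟨?_, ?_, ?_⟩
    · split <;> simp
    · exact (List.pairwise_map).2 (ih.imp (by omega))
    · intro a ha b hb
      simp only [List.mem_map] at hb
      obtain ⟨k, _, rfl⟩ := hb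
      split at ha <;> simp_all

theorem pvPop_shift (L : List Nat) (r : List String) (d : List (List String)) :
    (L.map (fun k : Nat => ((k : Int) + 1))).foldl
      (fun d i => match PySem.List.pop? d i with | some r => r.2 | none => d) (r :: d)
    = r :: (L.map (fun k : Nat => ((k : Int)))).foldl
      (fun d i => match PySem.List.pop? d i with | some r => r.2 | none => d) d := by
  induction L generalizing d with
  | nil => simp
  | cons k L ih =>
    simp only [List.map_cons, List.foldl_cons]
    have hstep : (match PySem.List.pop? (r :: d) ((k : Int) + 1) with
        | some r => r.2 | none => r :: d)
        = r :: (match PySem.List.pop? d (k : Int) with | some r => r.2 | none => d) := by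
      by_cases h : k < d.length
      · have h1 : ((k : Int) + 1) = ((k + 1 : Nat) : Int) := by push_cast; ring
        rw [h1, PySem.List.pop?_natCast (r :: d) (k+1) (by simpa using h),
            PySem.List.pop?_natCast d k h]
        simp [List.eraseIdx]
      · have h1 : PySem.List.pop? (r :: d) ((k:Int)+1) = none := by
          simp [PySem.List.pop?, PySem.List.pyIdx?, h]
          omega
        have h2 : PySem.List.pop? d (k:Int) = none := by
          simp [PySem.List.pop?, PySem.List.pyIdx?, h]
        rw [h1, h2]
    rw [hstep, ih]

theorem pvPopAll (ignorowane : List String) (xs : List (List String)) :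
    (((pvRem ignorowane xs).map (fun k : Nat => (k : Int))).reverse).foldl
      (fun d i => match PySem.List.pop? d i with | some r => r.2 | none => d) xs
    = xs.filter (fun r => !pvBad ignorowane r) := by
  induction xs with
  | nil => simp [pvRem]
  | cons r t ih =>
    simp only [pvRem, List.map_append, List.reverse_append, List.foldl_append, List.map_map]
    have hshift : ((List.map ((fun k : Nat => (k : Int)) ∘ (· + 1)) (pvRem ignorowane t)).reverse)
        = (pvRem ignorowane t).reverse.map (fun k : Nat => ((k : Int) + 1)) := by
      rw [← List.map_reverse]
      exact List.map_congr_left (fun k _ => by simp [Function.comp])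
    rw [hshift]
    have hrev : (pvRem ignorowane t).reverse.map (fun k : Nat => ((k : Int)))
        = ((pvRem ignorowane t).map (fun k : Nat => ((k : Int)))).reverse := by
      rw [List.map_reverse]
    rw [pvPop_shift, hrev, ih]
    by_cases hb : pvBad ignorowane r = true
    · simp [hb, PySem.List.pop?_zero_cons]
    · simp [hb]

theorem pvFinal (data : List (List String)) (ignorowane : List String) :
    ignore_kon_py data ignorowane = ignore_kon_py_alt data ignorowane := by
  unfold ignore_kon_py ignore_kon_py_alt
  simp only []
  rw [pvCollect ignorowane data 0 PySem.Set.empty (by intro x hx; simp [PySem.Set.empty] at hx)]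
  have hz : List.map (fun k : Nat => (k : Int) + 0) (pvRem ignorowane data)
      = List.map (fun k : Nat => (k : Int)) (pvRem ignorowane data) :=
    List.map_congr_left (fun k _ => by ring)
  have hnil : (PySem.Set.empty : PySem.Set Int) ++ List.map (fun k : Nat => (k : Int) + 0) (pvRem ignorowane data)
      = List.map (fun k : Nat => (k : Int)) (pvRem ignorowane data) := by
    rw [hz]; rfl
  rw [hnil]
  have hsorted : PySem.List.sorted (List.map (fun k : Nat => (k : Int)) (pvRem ignorowane data)) (fun x => x) false
      = List.map (fun k : Nat => (k : Int)) (pvRem ignorowane data) := by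
    apply PySem.List.sorted_eq_self_of_pairwise
    have := pvRem_pairwise ignorowane data
    exact (List.pairwise_map.2 (this.imp (fun h => by exact_mod_cast le_of_lt (by exact_mod_cast h))))
  rw [hsorted, PySem.List.slice?_none_none_neg_one, Option.getD_some, pvPopAll]
  rfl

-- ===== VERDICT (by name: the statement is the Claim_ definition above) =====
theorem ignore_kon_py_spec : Claim_equal_ignore_kon_py := by
  intro data ignorowane _
  show ignore_kon_py data ignorowane = ignore_kon_py_alt data ignorowane
  exact pvFinal data ignorowane
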